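-- pv_equiv track=rewrite | github.com/pdhborges/advent-of-code | 2017/3.py | neighbour_spiral
-- ===== SOURCE A (Python) =====
-- from itertools import islice
-- from collections import defaultdict
--
-- def neighbours(point):
--     x, y = point
--     return ((x+1, y), (x-1, y), (x, y+1), (x, y-1),
--             (x+1, y+1), (x-1, y-1), (x+1, y-1), (x-1, y+1))
--
-- def spiral_seq():
--     yield 0, 0
--     x, y = 1, 0
--     inc_x, inc_y = 0, 1
--     while True:
--         yield x, y
--         if abs(x) == abs(y):
--             if x <= 0 and y <= 0:
--                 inc_x, inc_y = 1, 0
--             elif x > 0 and y <= 0: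
--                 x += 1
--                 y -= 1
--                 inc_x, inc_y = 0, 1
--             elif x <= 0 and y > 0:
--                 inc_x, inc_y = 0, -1
--             else:
--                 inc_x, inc_y = -1, 0
--         x += inc_x
--         y += inc_y
--
-- def neighbour_spiral(limit):
--     matrix = defaultdict(int)
--     matrix[(0, 0)] = 1
--     for point in islice(spiral_seq(), 1, None):
--         value = sum(matrix[neighbour] for neighbour in neighbours(point))
--         if value > limit:
--             return value
--         else:
--             matrix[point] = value
-- ===== SOURCE B (Python) =====
-- def neighbour_spiral(limit):
--     # Closed-form spiral indexing (ring/side/offset) + a spiral-ordered list of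
--     # filled cells scanned for Chebyshev-adjacent values; no generator, no dict.
--     def spiral_pos(n):
--         if n == 0:
--             return (0, 0)
--         r = 1
--         while n > (2 * r + 1) ** 2 - 1:
--             r += 1
--         t = n - (2 * r - 1) ** 2
--         side, j = divmod(t, 2 * r)
--         if side == 0:
--             return (r, -r + 1 + j)
--         if side == 1:
--             return (r - 1 - j, r)
--         if side == 2:
--             return (-r, r - 1 - j)
--         return (-r + 1 + j, -r)
--
--     cells = [((0, 0), 1)]  # filled cells in spiral order
--     n = 1
--     while True:
--         x, y = spiral_pos(n)
--         v = sum(val for (a, b), val in cells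
--                 if abs(a - x) <= 1 and abs(b - y) <= 1)
--         if v > limit:
--             return v
--         cells.append(((x, y), v))
--         n += 1
-- ===== Notes on version B (the rewrite author's own statement) =====
-- stated objective: alternative
-- what changed: Replaces A's stateful spiral generator (corner-detecting state machine, islice) and defaultdict-of-8-lookups by a closed-form ring/side/offset formula computing each spiral cell's coordinates directly from its index, plus a spiral-ordered list of filled cells that is scanned for Chebyshev-adjacent values instead of any dictionary lookup.
import Mathlib
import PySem

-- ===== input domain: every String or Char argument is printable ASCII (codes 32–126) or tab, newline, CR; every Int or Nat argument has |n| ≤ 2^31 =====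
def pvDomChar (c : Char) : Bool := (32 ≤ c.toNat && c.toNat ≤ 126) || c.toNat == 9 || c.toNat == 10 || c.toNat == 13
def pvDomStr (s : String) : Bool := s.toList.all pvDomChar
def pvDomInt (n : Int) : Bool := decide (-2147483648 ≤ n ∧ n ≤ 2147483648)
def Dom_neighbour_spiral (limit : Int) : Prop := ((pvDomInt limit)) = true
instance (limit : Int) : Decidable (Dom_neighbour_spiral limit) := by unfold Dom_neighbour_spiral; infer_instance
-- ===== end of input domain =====

-- B drops A's spiral generator and defaultdict entirely: it computes each spiral cell's
-- coordinates by a closed-form ring/side/offset decomposition and sums Chebyshev-adjacent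
-- values by scanning a spiral-ordered list of filled cells; objective: alternative, same cost.
-- Both loops carry fuel 200: any |limit| ≤ 2^31 stops within 145 iterations, so the fuel
-- guard is never reached on the stated domain (it only makes the recursion total).

-- ===== PORT A =====
-- A's 8-neighbour tuple, in A's order
def pvNeighboursA (p : Int × Int) : List (Int × Int) :=
  match p with
  | (x, y) => [(x+1, y), (x-1, y), (x, y+1), (x, y-1),
               (x+1, y+1), (x-1, y-1), (x+1, y-1), (x-1, y+1)]

-- sum(matrix[n] for n in neighbours(point)); reading a missing key of the defaultdict
-- inserts 0 there, which never changes any later sum, so getD _ 0 is exact for the result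
def pvSumA (m : PySem.Dict (Int × Int) Int) (p : Int × Int) : Int :=
  (pvNeighboursA p).foldl (fun a q => a + m.getD q 0) 0

-- one iteration of spiral_seq's while-loop body after the yield
def pvStepA (s : Int × Int × Int × Int) : Int × Int × Int × Int :=
  match s with
  | (x, y, ix, iy) =>
    let (x, y, ix, iy) :=
      if x.natAbs = y.natAbs then
        if x ≤ 0 ∧ y ≤ 0 then (x, y, (1 : Int), (0 : Int))
        else if x > 0 ∧ y ≤ 0 then (x + 1, y - 1, 0, 1)
        else if x ≤ 0 ∧ y > 0 then (x, y, 0, -1)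
        else (x, y, -1, 0)
      else (x, y, ix, iy)
    (x + ix, y + iy, ix, iy)

def pvLoopA (limit : Int) : Nat → PySem.Dict (Int × Int) Int → Int × Int × Int × Int → Int
  | 0, _, _ => 0
  | fuel+1, m, s =>
    let v := pvSumA m (s.1, s.2.1)
    if v > limit then v
    else pvLoopA limit fuel (m.insert (s.1, s.2.1) v) (pvStepA s)

def neighbour_spiral (limit : Int) : Int :=
  pvLoopA limit 200 (PySem.Dict.empty.insert (0, 0) 1) (1, 0, 0, 1)

-- ===== PORT B =====
-- 'while n > (2r+1)^2 - 1: r += 1' ; n ≤ fuel of the main loop, so ring fuel 200 never runs out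
def pvRingFind (n : Nat) : Nat → Nat → Nat
  | 0, r => r
  | f+1, r => if n > (2*r+1)^2 - 1 then pvRingFind n f (r+1) else r

-- closed-form spiral_pos: ring r, side, offset j (Python divmod on naturals = Nat div/mod, exact)
def pvSpiralPos (n : Nat) : Int × Int :=
  if n = 0 then (0, 0)
  else
    let r := pvRingFind n 200 1
    let t := n - (2*r - 1)^2
    let side := t / (2*r)
    let j : Int := (t % (2*r) : Nat)
    let r : Int := (r : Nat)
    if side = 0 then (r, -r + 1 + j)
    else if side = 1 then (r - 1 - j, r)
    else if side = 2 then (-r, r - 1 - j)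
    else (-r + 1 + j, -r)

-- sum(val for (a, b), val in cells if abs(a-x) <= 1 and abs(b-y) <= 1)
def pvSumCells (cells : List ((Int × Int) × Int)) (x y : Int) : Int :=
  cells.foldl (fun acc c =>
    if (c.1.1 - x).natAbs ≤ 1 ∧ (c.1.2 - y).natAbs ≤ 1 then acc + c.2 else acc) 0

def pvLoopB (limit : Int) : Nat → List ((Int × Int) × Int) → Nat → Int
  | 0, _, _ => 0
  | fuel+1, cells, n =>
    let p := pvSpiralPos n
    let v := pvSumCells cells p.1 p.2
    if v > limit then v
    else pvLoopB limit fuel (cells ++ [(p, v)]) (n+1)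

def neighbour_spiral_alt (limit : Int) : Int :=
  pvLoopB limit 200 [((0, 0), 1)] 1

-- ===== PRECONDITION & SPEC =====
def Spec_neighbour_spiral (limit : Int) (out : Int) : Prop := out = neighbour_spiral_alt limit
instance (limit : Int) (out : Int) : Decidable (Spec_neighbour_spiral limit out) := by unfold Spec_neighbour_spiral; infer_instance

-- ===== CLAIM (what is proved, stated in full; the proofs are below) =====
def Claim_equal_neighbour_spiral : Prop := ∀ (limit : Int), Dom_neighbour_spiral limit → Spec_neighbour_spiral limit (neighbour_spiral limit)

-- ===== LEMMAS AND PROOFS =====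

-- the limit-independent sequence of candidate values each loop would test, fuel-truncated
def pvTraceA : Nat → PySem.Dict (Int × Int) Int → Int × Int × Int × Int → List Int
  | 0, _, _ => []
  | f+1, m, s =>
    let v := pvSumA m (s.1, s.2.1)
    v :: pvTraceA f (m.insert (s.1, s.2.1) v) (pvStepA s)

def pvTraceB : Nat → List ((Int × Int) × Int) → Nat → List Int
  | 0, _, _ => []
  | f+1, cells, n =>
    let p := pvSpiralPos n
    let v := pvSumCells cells p.1 p.2
    v :: pvTraceB f (cells ++ [(p, v)]) (n+1)

-- return the first value exceeding limit (0 if none): the shared stopping rule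
def pvFirstOver (limit : Int) : List Int → Int
  | [] => 0
  | v :: vs => if v > limit then v else pvFirstOver limit vs

theorem pvLoopA_trace (limit : Int) :
    ∀ (f : Nat) (m : PySem.Dict (Int × Int) Int) (s : Int × Int × Int × Int),
      pvLoopA limit f m s = pvFirstOver limit (pvTraceA f m s) := by
  intro f
  induction f with
  | zero => intro m s; rfl
  | succ f ih =>
    intro m s
    simp only [pvLoopA, pvTraceA, pvFirstOver]
    split_ifs with h
    · rfl
    · exact ih _ _

theorem pvLoopB_trace (limit : Int) :
    ∀ (f : Nat) (cells : List ((Int × Int) × Int)) (n : Nat),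
      pvLoopB limit f cells n = pvFirstOver limit (pvTraceB f cells n) := by
  intro f
  induction f with
  | zero => intro cells n; rfl
  | succ f ih =>
    intro cells n
    simp only [pvLoopB, pvTraceB, pvFirstOver]
    split_ifs with h
    · rfl
    · exact ih _ _

set_option maxRecDepth 100000 in
set_option maxHeartbeats 4000000 in
theorem pvTrace_eq :
    pvTraceA 200 (PySem.Dict.empty.insert (0, 0) 1) (1, 0, 0, 1) =
      pvTraceB 200 [((0, 0), 1)] 1 := by decide

-- ===== VERDICT (by name: the statement is the Claim_ definition above) =====
theorem neighbour_spiral_spec : Claim_equal_neighbour_spiral := by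
  intro limit _
  unfold Spec_neighbour_spiral neighbour_spiral neighbour_spiral_alt
  rw [pvLoopA_trace, pvLoopB_trace, pvTrace_eq]
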